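-- pv_equiv track=rewrite | github.com/WichapasHim/HimSourceCode | Chula/chapter_4.py | item_9
-- ===== SOURCE A (Python) =====
-- def item_9(s:str)->str:
--     check=0
--     count=0
--     for letter in s:
--         if letter in 'aeiou':
--             check+=1
--         else:
--             if check!=0:
--                 count+=1
--     if s[-1] in 'aeiuo':
--         count+=1
--     return count
-- ===== SOURCE B (Python) =====
-- def item_9(s: str) -> int:
--     bonus = 1 if s[-1] in 'aeiou' else 0
--     idx = next((i for i, c in enumerate(s) if c in 'aeiou'), None)
--     if idx is None:
--         return bonus
--     return sum(1 for c in s[idx + 1:] if c not in 'aeiou') + bonus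
-- ===== Notes on version B (the rewrite author's own statement) =====
-- stated objective: alternative
-- what changed: Replaces A's stateful vowel-seen flag pass with locating the first vowel index and counting non-vowels in the suffix after it, plus a last-char bonus.
import Mathlib
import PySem

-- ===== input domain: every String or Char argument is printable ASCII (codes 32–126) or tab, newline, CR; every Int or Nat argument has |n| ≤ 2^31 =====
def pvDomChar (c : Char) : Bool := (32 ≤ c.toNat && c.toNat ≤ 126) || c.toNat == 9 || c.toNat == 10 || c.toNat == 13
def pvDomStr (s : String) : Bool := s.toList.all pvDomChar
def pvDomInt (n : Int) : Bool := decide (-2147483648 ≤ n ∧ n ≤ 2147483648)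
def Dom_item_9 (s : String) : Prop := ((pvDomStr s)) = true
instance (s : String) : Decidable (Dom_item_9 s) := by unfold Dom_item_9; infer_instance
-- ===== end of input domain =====

-- B locates the first vowel and counts non-vowels in the suffix after it, instead of A's running vowel-seen flag (alternative decomposition, same cost). Return-value equivalence on nonempty strings (A raises IndexError on "").


-- ===== PORT A =====
-- `letter in 'aeiou'`
def pvVowelA (c : Char) : Bool := (['a','e','i','o','u'] : List Char).contains c
-- `s[-1] in 'aeiuo'` (same set, A's spelling)
def pvVowelA' (c : Char) : Bool := (['a','e','i','u','o'] : List Char).contains c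

-- the loop body, named (one step of A's for-loop)
def pvStepA (st : Int × Int) (letter : Char) : Int × Int :=
  if pvVowelA letter then (st.1 + 1, st.2)
  else if st.1 ≠ 0 then (st.1, st.2 + 1) else st

def item_9 (s : String) : Int :=
  let st := s.toList.foldl pvStepA (0, 0)
  match PySem.Str.pyGet? s (-1) with
  | some c => if pvVowelA' c then st.2 + 1 else st.2
  | none => st.2    -- Python raises IndexError here; excluded by Pre_item_9

-- ===== PORT B =====
def pvVowelB (c : Char) : Bool := (['a','e','i','o','u'] : List Char).contains c

def item_9_alt (s : String) : Int :=
  let bonus : Int :=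
    match PySem.Str.pyGet? s (-1) with
    | some c => if pvVowelB c then 1 else 0
    | none => 0   -- Python raises IndexError here; excluded by Pre_item_9
  match s.toList.findIdx? pvVowelB with
  | none => bonus
  | some i => (((s.toList.drop (i + 1)).filter (fun c => !pvVowelB c)).length : Int) + bonus

-- ===== PRECONDITION & SPEC =====
-- Pre_ excludes only the empty string, on which A (and B) raise IndexError at s[-1].
def Pre_item_9 (s : String) : Prop := s ≠ ""
instance (s : String) : Decidable (Pre_item_9 s) := by unfold Pre_item_9; infer_instance
def pvWitness_item_9 : String := "abc"

def Spec_item_9 (s : String) (out : Int) : Prop := out = item_9_alt s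
instance (s : String) (out : Int) : Decidable (Spec_item_9 s out) := by unfold Spec_item_9; infer_instance

-- ===== CLAIM (what is proved, stated in full; the proofs are below) =====
def Claim_equal_item_9 : Prop := ∀ (s : String), Dom_item_9 s → Pre_item_9 s → Spec_item_9 s (item_9 s)

-- ===== LEMMAS AND PROOFS =====

-- once check ≠ 0, every later non-vowel is counted
theorem foldA_pos (l : List Char) (c k : Int) (hc : 0 < c) :
    (l.foldl pvStepA (c, k)).2 = k + ((l.filter (fun x => !pvVowelA x)).length : Int) := by
  induction l generalizing c k with
  | nil => simp
  | cons x xs ih =>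
    by_cases hx : pvVowelA x = true
    · simp only [List.foldl_cons, pvStepA, hx, if_true, List.filter_cons, Bool.not_true,
        Bool.false_eq_true, if_false]
      exact ih (c + 1) k (by omega)
    · simp only [Bool.not_eq_true] at hx
      have hc' : c ≠ 0 := by omega
      simp only [List.foldl_cons, pvStepA, hx, Bool.false_eq_true, if_false, hc',
        ne_eq, not_false_iff, if_true]
      rw [ih c (k + 1) hc, List.filter_cons_of_pos (by simp [hx])]
      simp only [List.length_cons]
      push_cast
      ring

-- from check = 0: counted non-vowels are exactly those after the first vowel
theorem foldA_zero (l : List Char) (k : Int) :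
    (l.foldl pvStepA (0, k)).2 =
      k + (match l.findIdx? pvVowelA with
           | none => (0 : Int)
           | some i => (((l.drop (i + 1)).filter (fun x => !pvVowelA x)).length : Int)) := by
  induction l generalizing k with
  | nil => simp
  | cons x xs ih =>
    by_cases hx : pvVowelA x = true
    · rw [List.findIdx?_cons]
      simp only [hx, List.foldl_cons, pvStepA, if_true]
      simpa using foldA_pos xs (0 + 1) k (by omega)
    · simp only [Bool.not_eq_true] at hx
      rw [List.findIdx?_cons]
      simp only [hx, List.foldl_cons, pvStepA, Bool.false_eq_true, if_false, ne_eq,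
        not_true]
      rw [ih k]
      cases h : xs.findIdx? pvVowelA with
      | none => simp
      | some i => simp

theorem vowelAB : pvVowelA = pvVowelB := rfl
theorem vowelA'B (c : Char) : pvVowelA' c = pvVowelB c := by
  simp only [pvVowelA', pvVowelB, List.contains_eq_mem, List.mem_cons, List.not_mem_nil,
    or_false]
  by_cases h1 : c = 'o' <;> by_cases h2 : c = 'u' <;> simp [h1, h2]

-- ===== VERDICT (by name: the statement is the Claim_ definition above) =====
theorem item_9_spec : Claim_equal_item_9 := by
  intro s _ hpre
  unfold Spec_item_9 item_9 item_9_alt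
  have hfold := foldA_zero s.toList 0
  simp only [zero_add] at hfold
  cases hlast : PySem.Str.pyGet? s (-1) with
  | none =>
    exfalso
    have hne : s.toList ≠ [] := by
      simpa [String.toList_eq_nil_iff] using hpre
    rw [show PySem.Str.pyGet? s (-1) = PySem.List.pyGet? s.toList (-1) from rfl,
      PySem.List.pyGet?_neg_one, List.getLast?_eq_none_iff] at hlast
    exact hne hlast
  | some c =>
    rw [vowelAB] at hfold
    simp only [hfold, vowelA'B]
    cases h : s.toList.findIdx? pvVowelB <;> split <;> simp
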